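-- pv_equiv track=rewrite | github.com/godcrampy/svnit-archives | sem-6/ss/lab-3/index.py | generate_pool_table
-- ===== SOURCE A (Python) =====
-- def generate_pool_table(literal_table):
--     pool_table = []
--     for i, r in enumerate(literal_table):
--         if i == 0:
--             pool_table.append([r[0]])
--         elif r[2] != 1 + literal_table[i - 1][2]:
--             pool_table.append([r[0]])
--     return pool_table
-- ===== SOURCE B (Python) =====
-- def generate_pool_table(literal_table):
--     pool_table = []
--     rest = literal_table
--     while rest:
--         pool_table.append([rest[0][0]])
--         k = 1
--         while k < len(rest) and rest[k][2] == rest[0][2] + k: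
--             k += 1
--         rest = rest[k:]
--     return pool_table
-- ===== Notes on version B (the rewrite author's own statement) =====
-- stated objective: alternative
-- what changed: B replaces A's flat indexed pass that compares each row's address to its predecessor's plus one by a nested run-skipping loop: the outer loop emits one pool per iteration, an inner scan measures the length of the maximal run whose addresses match the run anchor's address plus the offset, and the scanned run is sliced off the worklist.
import Mathlib
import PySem

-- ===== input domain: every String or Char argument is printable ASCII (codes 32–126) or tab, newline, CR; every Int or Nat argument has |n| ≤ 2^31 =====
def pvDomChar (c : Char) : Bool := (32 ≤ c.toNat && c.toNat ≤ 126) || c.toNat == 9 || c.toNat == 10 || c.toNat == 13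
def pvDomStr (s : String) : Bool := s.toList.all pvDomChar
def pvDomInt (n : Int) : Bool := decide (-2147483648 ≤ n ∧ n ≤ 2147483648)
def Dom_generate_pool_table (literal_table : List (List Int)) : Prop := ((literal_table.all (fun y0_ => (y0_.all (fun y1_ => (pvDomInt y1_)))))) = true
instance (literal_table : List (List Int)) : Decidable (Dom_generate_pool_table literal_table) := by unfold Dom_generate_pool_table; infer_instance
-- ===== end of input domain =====

-- B consumes the table run by run (outer loop per pool, inner scan comparing each row's address to the run anchor's address plus offset, then slicing the run off), instead of A's flat indexed pass comparing each row with its predecessor; alternative decomposition, same result.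


-- ===== PORT A =====
def generate_pool_table (literal_table : List (List Int)) : List (List Int) :=
  (PySem.List.enumerate literal_table).foldl
    (fun pool_table ir =>
      if ir.1 = 0 then
        pool_table ++ [[PySem.List.pyGetD ir.2 0 0]]
      else if PySem.List.pyGetD ir.2 2 0 ≠
          1 + PySem.List.pyGetD (PySem.List.pyGetD literal_table (ir.1 - 1) []) 2 0 then
        pool_table ++ [[PySem.List.pyGetD ir.2 0 0]]
      else pool_table)
    []

-- ===== PORT B =====
-- inner while of Source B: advance k while rest[k][2] == rest[0][2] + k
def pvRunLen (rest : List (List Int)) (k : Nat) : Nat :=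
  if h : k < rest.length ∧
      PySem.List.pyGetD (PySem.List.pyGetD rest (k : Int) []) 2 0 =
        PySem.List.pyGetD (PySem.List.pyGetD rest 0 []) 2 0 + (k : Int) then
    pvRunLen rest (k + 1)
  else k
termination_by rest.length - k

theorem pvRunLen_ge (rest : List (List Int)) (k : Nat) : k ≤ pvRunLen rest k := by
  unfold pvRunLen
  split
  · exact le_trans (Nat.le_succ k) (pvRunLen_ge rest (k + 1))
  · exact le_refl k
termination_by rest.length - k

-- outer while of Source B: emit the run head, slice the run off, repeat
def pvGoB (rest : List (List Int)) : List (List Int) :=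
  if _hne : rest = [] then []
  else
    [[PySem.List.pyGetD (PySem.List.pyGetD rest 0 []) 0 0]] ++
      pvGoB (PySem.List.slice rest (some (pvRunLen rest 1)) none)
termination_by rest.length
decreasing_by
  rw [PySem.List.slice_from_natCast]
  have h1 := pvRunLen_ge rest 1
  have : rest.length ≠ 0 := fun h => _hne (List.eq_nil_of_length_eq_zero h)
  simp only [List.length_drop]
  omega

def generate_pool_table_alt (literal_table : List (List Int)) : List (List Int) :=
  pvGoB literal_table

-- ===== PRECONDITION & SPEC =====
-- Pre_ is exactly where the Python A returns without an IndexError: with ≥ 2 rows every row's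
-- index 2 is read (and index 0 on pool starts), so all rows need length ≥ 3; a lone row only
-- has its index 0 read.
def Pre_generate_pool_table (literal_table : List (List Int)) : Prop :=
  (literal_table.length = 1 → ∀ r ∈ literal_table, 1 ≤ r.length) ∧
  (2 ≤ literal_table.length → ∀ r ∈ literal_table, 3 ≤ r.length)
instance (literal_table : List (List Int)) : Decidable (Pre_generate_pool_table literal_table) := by
  unfold Pre_generate_pool_table; infer_instance

def pvWitness_generate_pool_table : List (List Int) :=
  [[10, 0, 100], [20, 0, 101], [30, 0, 200], [40, 0, 201]]

def Spec_generate_pool_table (literal_table : List (List Int)) (out : List (List Int)) : Prop := out = generate_pool_table_alt literal_table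
instance (literal_table : List (List Int)) (out : List (List Int)) : Decidable (Spec_generate_pool_table literal_table out) := by unfold Spec_generate_pool_table; infer_instance

-- ===== CLAIM (what is proved, stated in full; the proofs are below) =====
def Claim_equal_generate_pool_table : Prop := ∀ (literal_table : List (List Int)), Dom_generate_pool_table literal_table → Pre_generate_pool_table literal_table → Spec_generate_pool_table literal_table (generate_pool_table literal_table)

-- ===== LEMMAS AND PROOFS =====

-- common characterisation: pool starts after the first row, detected pairwise
def pvTail (prev : List Int) (rest : List (List Int)) : List (List Int) :=
  match rest with
  | [] => []
  | r :: rs =>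
    (if PySem.List.pyGetD r 2 0 ≠ PySem.List.pyGetD prev 2 0 + 1
      then [[PySem.List.pyGetD r 0 0]] else []) ++ pvTail r rs

theorem pvTail_cons (prev r : List Int) (rs : List (List Int)) :
    pvTail prev (r :: rs) =
      (if PySem.List.pyGetD r 2 0 ≠ PySem.List.pyGetD prev 2 0 + 1
        then [[PySem.List.pyGetD r 0 0]] else []) ++ pvTail r rs := rfl

def pvSpecL (lt : List (List Int)) : List (List Int) :=
  match lt with
  | [] => []
  | p :: rs => [[PySem.List.pyGetD p 0 0]] ++ pvTail p rs

-- ===== A equals the pairwise characterisation =====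
theorem pvKey (rest : List (List Int)) :
    ∀ (pre : List (List Int)) (prev : List Int) (acc : List (List Int)),
    (PySem.List.enumerate rest ((pre.length : Int) + 1)).foldl
      (fun pool_table ir =>
        if ir.1 = 0 then
          pool_table ++ [[PySem.List.pyGetD ir.2 0 0]]
        else if PySem.List.pyGetD ir.2 2 0 ≠
            1 + PySem.List.pyGetD (PySem.List.pyGetD (pre ++ prev :: rest) (ir.1 - 1) []) 2 0 then
          pool_table ++ [[PySem.List.pyGetD ir.2 0 0]]
        else pool_table)
      acc = acc ++ pvTail prev rest := by
  induction rest with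
  | nil => intro pre prev acc; simp [PySem.List.enumerate, pvTail]
  | cons r rs ih =>
    intro pre prev acc
    rw [PySem.List.enumerate_cons, List.foldl_cons]
    have hne : ¬ ((pre.length : Int) + 1) = 0 := by positivity
    have hprev : PySem.List.pyGetD (pre ++ prev :: r :: rs) ((pre.length : Int) + 1 - 1) [] = prev := by
      have : (pre.length : Int) + 1 - 1 = (pre.length : Int) := by ring
      rw [this]
      simp
    have hstep : ∀ acc' : List (List Int),
        (PySem.List.enumerate rs ((pre.length : Int) + 1 + 1)).foldl
          (fun pool_table ir =>
            if ir.1 = 0 then pool_table ++ [[PySem.List.pyGetD ir.2 0 0]]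
            else if PySem.List.pyGetD ir.2 2 0 ≠
                1 + PySem.List.pyGetD (PySem.List.pyGetD (pre ++ prev :: r :: rs) (ir.1 - 1) []) 2 0 then
              pool_table ++ [[PySem.List.pyGetD ir.2 0 0]]
            else pool_table) acc' = acc' ++ pvTail r rs := by
      intro acc'
      have h2 : ((pre ++ [prev]).length : Int) + 1 = (pre.length : Int) + 1 + 1 := by
        simp
      have h3 : pre ++ prev :: r :: rs = (pre ++ [prev]) ++ r :: rs := by simp
      rw [h3, ← h2]
      exact ih (pre ++ [prev]) r acc'
    simp only [hne, if_false, hprev]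
    split_ifs with hc
    · rw [hstep, pvTail_cons,
        if_pos (by omega : PySem.List.pyGetD r 2 0 ≠ PySem.List.pyGetD prev 2 0 + 1)]
      simp
    · rw [hstep, pvTail_cons,
        if_neg (by omega : ¬ PySem.List.pyGetD r 2 0 ≠ PySem.List.pyGetD prev 2 0 + 1)]
      simp

theorem a_eq_spec (lt : List (List Int)) : generate_pool_table lt = pvSpecL lt := by
  unfold generate_pool_table
  cases lt with
  | nil => simp [PySem.List.enumerate, pvSpecL]
  | cons first rest =>
    rw [PySem.List.enumerate_cons, List.foldl_cons]
    have := pvKey rest [] first [[PySem.List.pyGetD first 0 0]]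
    simp only [List.length_nil, Int.natCast_zero, zero_add, List.nil_append] at this
    rw [show (0 : Int) + 1 = 1 from rfl]
    simp only [if_true]
    rw [List.nil_append]
    exact this.trans (by simp [pvSpecL])

-- ===== B equals the pairwise characterisation =====
-- inner-scan invariant: while the run condition holds, pvTail stays silent
theorem pvRun_spec : ∀ (m : Nat) (lt : List (List Int)) (k : Nat), lt.length - k ≤ m → 1 ≤ k → k ≤ lt.length →
    PySem.List.pyGetD (PySem.List.pyGetD lt ((k : Int) - 1) []) 2 0 =
      PySem.List.pyGetD (PySem.List.pyGetD lt 0 []) 2 0 + ((k : Int) - 1) →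
    pvTail (PySem.List.pyGetD lt ((k : Int) - 1) []) (lt.drop k) = pvSpecL (lt.drop (pvRunLen lt k)) := by
  intro m
  induction m with
  | zero =>
    intro lt k hm h1 hk hinv
    have hkl : k = lt.length := by omega
    rw [pvRunLen]
    have : ¬ (k < lt.length ∧ PySem.List.pyGetD (PySem.List.pyGetD lt (k : Int) []) 2 0 =
        PySem.List.pyGetD (PySem.List.pyGetD lt 0 []) 2 0 + (k : Int)) := by omega
    rw [dif_neg this, hkl, List.drop_length]
    rfl
  | succ n ih =>
    intro lt k hm h1 hk hinv
    rw [pvRunLen]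
    by_cases h : k < lt.length ∧ PySem.List.pyGetD (PySem.List.pyGetD lt (k : Int) []) 2 0 =
        PySem.List.pyGetD (PySem.List.pyGetD lt 0 []) 2 0 + (k : Int)
    · rw [dif_pos h]
      obtain ⟨hlt, hv⟩ := h
      have hget : PySem.List.pyGetD lt (k : Int) [] = lt[k] := by
        rw [PySem.List.pyGetD_natCast, List.getD_eq_getElem lt [] hlt]
      have hdrop : lt.drop k = lt[k] :: lt.drop (k + 1) := List.drop_eq_getElem_cons hlt
      rw [hdrop, pvTail_cons,
        if_neg (by rw [← hget, hv, hinv]; intro hcon; omega)]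
      have hk1 : ((k : Int) + 1) - 1 = (k : Int) := by ring
      have := ih lt (k + 1) (by omega) (by omega) (by omega)
        (by rw [Nat.cast_add, Nat.cast_one, hk1, hget]; rw [hget] at hv; omega)
      push_cast at this
      rw [hk1, hget] at this
      simpa using this
    · rw [dif_neg h]
      rcases Nat.lt_or_ge k lt.length with hlt | hge
      · have hne : PySem.List.pyGetD (PySem.List.pyGetD lt (k : Int) []) 2 0 ≠
            PySem.List.pyGetD (PySem.List.pyGetD lt 0 []) 2 0 + (k : Int) := by
          intro hcon; exact h ⟨hlt, hcon⟩
        have hget : PySem.List.pyGetD lt (k : Int) [] = lt[k] := by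
          rw [PySem.List.pyGetD_natCast, List.getD_eq_getElem lt [] hlt]
        have hdrop : lt.drop k = lt[k] :: lt.drop (k + 1) := List.drop_eq_getElem_cons hlt
        rw [hdrop, pvTail_cons,
          if_pos (by rw [← hget]; rw [hinv]; intro hcon; apply hne; rw [hcon]; ring)]
        rfl
      · have hkl : k = lt.length := by omega
        rw [hkl, List.drop_length]
        rfl

theorem b_eq_spec_bounded : ∀ (n : Nat) (lt : List (List Int)), lt.length ≤ n → pvGoB lt = pvSpecL lt := by
  intro n
  induction n with
  | zero =>
    intro lt hl
    have : lt = [] := List.eq_nil_of_length_eq_zero (by omega)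
    rw [this, pvGoB]
    rfl
  | succ n ih =>
    intro lt hl
    cases lt with
    | nil => rw [pvGoB]; rfl
    | cons p rs =>
      rw [pvGoB, dif_neg (by simp : ¬ (p :: rs) = [])]
      rw [PySem.List.slice_from_natCast]
      have hrg := pvRunLen_ge (p :: rs) 1
      have hrun := pvRun_spec ((p :: rs).length) (p :: rs) 1 (by omega) (le_refl 1)
        (by simp) (by norm_num)
      have hdrop1 : (p :: rs).drop 1 = rs := rfl
      simp only [Nat.cast_one] at hrun
      have hp0 : PySem.List.pyGetD (p :: rs) ((1 : Int) - 1) [] = p := by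
        norm_num [PySem.List.pyGetD_zero_cons]
      rw [hdrop1, hp0] at hrun
      have hlen : ((p :: rs).drop (pvRunLen (p :: rs) 1)).length ≤ n := by
        simp only [List.length_drop, List.length_cons]
        simp only [List.length_cons] at hl
        omega
      rw [ih _ hlen, ← hrun]
      rw [PySem.List.pyGetD_zero_cons p rs []]
      rfl

theorem b_eq_spec (lt : List (List Int)) : pvGoB lt = pvSpecL lt :=
  b_eq_spec_bounded lt.length lt (le_refl _)

-- ===== VERDICT (by name: the statement is the Claim_ definition above) =====
theorem generate_pool_table_spec : Claim_equal_generate_pool_table := by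
  intro lt _ _
  unfold Spec_generate_pool_table generate_pool_table_alt
  rw [a_eq_spec, ← b_eq_spec]
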